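-- pv_equiv track=rewrite | github.com/magicgh/Ask-before-Plan | evaluation/planning/commonsense_constraint.py | is_valid_city_sequence
-- ===== SOURCE A (Python) =====
-- def is_valid_city_sequence(city_list):
--     """
--     Checks if the city sequence is valid. A valid sequence has every city (except the first and last)
--     appearing consecutively, and no city should appear again once its sequence is over.
--
--     Args:
--     - city_list (list): List of cities.
--
--     Returns:
--     - bool: True if the sequence is valid, False otherwise.
--     """
--
--     # If the list has less than 3 cities, it's invalid.
--     if len(city_list) < 3:
--         return False
--
--     # Set to keep track of visited cities
--     visited_cities = set()
--
--     i = 0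
--     while i < len(city_list):
--         city = city_list[i]
--
--         # If the city was already visited, it's invalid.
--         if city in visited_cities and (i != 0 and i != len(city_list) - 1):
--             return False
--
--         # Count the consecutive occurrences of the city
--         count = 0
--         while i < len(city_list) and city_list[i] == city:
--             count += 1
--             i += 1
--
--         # If the city appeared only once in the medium, it's invalid.
--         if count == 1 and 0 < i - 1 < len(city_list) - 1:
--             return False
--
--         visited_cities.add(city)
--
--     return True
-- ===== SOURCE B (Python) =====
-- def is_valid_city_sequence(city_list):
--     n = len(city_list)
--     if n < 3:
--         return False
--     # Pass 1: group the list into consecutive runs as (city, start_index, length).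
--     runs = []
--     start = 0
--     for idx, city in enumerate(city_list):
--         if idx + 1 == n or city_list[idx + 1] != city:
--             runs.append((city, start, idx + 1 - start))
--             start = idx + 1
--     # Pass 2: validate the run records.
--     visited = set()
--     for city, s, length in runs:
--         if city in visited and s != 0 and s != n - 1:
--             return False
--         if length == 1 and 0 < s < n - 1:
--             return False
--         visited.add(city)
--     return True
-- ===== Notes on version B (the rewrite author's own statement) =====
-- stated objective: idiomatic
-- what changed: Replaced A's single index-advancing scan with nested while loops by two separately-shaped passes: one enumerate-driven pass building an explicit runs table (city, start, length), then a distinct validation pass over those run records.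
import Mathlib
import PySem

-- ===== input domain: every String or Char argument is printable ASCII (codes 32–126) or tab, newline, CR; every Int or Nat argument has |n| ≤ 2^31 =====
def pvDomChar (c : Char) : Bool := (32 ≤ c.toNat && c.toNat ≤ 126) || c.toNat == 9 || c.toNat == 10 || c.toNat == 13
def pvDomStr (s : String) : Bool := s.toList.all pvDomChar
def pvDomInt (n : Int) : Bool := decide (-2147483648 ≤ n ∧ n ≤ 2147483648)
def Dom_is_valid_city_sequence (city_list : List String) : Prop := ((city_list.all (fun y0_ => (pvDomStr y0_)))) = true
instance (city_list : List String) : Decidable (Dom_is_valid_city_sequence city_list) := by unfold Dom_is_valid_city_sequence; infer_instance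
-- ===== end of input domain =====

-- B replaces A's single index-advancing scan (with a nested counting while-loop) by two
-- separately-shaped passes: one grouping pass building an explicit runs table
-- (city, start, length), then a distinct validation pass over those run records (idiomatic).
-- All Python ints here are nonnegative and every subtraction is nonnegative in Python,
-- so Nat arithmetic in the ports is exact.

-- ===== PORT A =====
-- inner while loop of A: counts consecutive occurrences of `city` starting at index i
def pvCountA (xs : List String) (city : String) (i : Nat) : Nat :=
  if h : i < xs.length then
    if xs[i]! = city then 1 + pvCountA xs city (i + 1) else 0
  else 0
termination_by xs.length - i

theorem pvCountA_pos (xs : List String) (i : Nat) (h : i < xs.length) :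
    0 < pvCountA xs xs[i]! i := by
  rw [pvCountA]; simp [h]

-- outer while loop of A; Python's i after the inner loop is i + count
def pvLoopA (xs : List String) (i : Nat) (visited : PySem.Set String) : Bool :=
  if h : i < xs.length then
    let city := xs[i]!
    if PySem.Set.contains visited city && (i != 0) && (i != xs.length - 1) then false
    else
      let count := pvCountA xs city i
      if (count == 1) && decide (0 < i + count - 1) && decide (i + count - 1 < xs.length - 1) then
        false
      else pvLoopA xs (i + count) (PySem.Set.add visited city)
  else true
termination_by xs.length - i
decreasing_by
  have := pvCountA_pos xs i h
  omega

def is_valid_city_sequence (city_list : List String) : Bool :=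
  if city_list.length < 3 then false
  else pvLoopA city_list 0 PySem.Set.empty

-- ===== PORT B =====
-- pass 1: `for idx, city in enumerate(city_list)` building the runs table; state = (runs, start)
-- (List.zipIdx is exact for Python's enumerate here: indices are Nat, pairs (city, idx))
def pvBuildRuns (xs : List String) : List (String × Nat × Nat) :=
  (xs.zipIdx.foldl
    (fun (acc : List (String × Nat × Nat) × Nat) (p : String × Nat) =>
      if p.2 + 1 == xs.length || xs[p.2 + 1]! != p.1 then
        (acc.1 ++ [(p.1, acc.2, p.2 + 1 - acc.2)], p.2 + 1)
      else acc)
    ([], 0)).1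

-- pass 2: validate the run records
def pvCheckRuns (n : Nat) : List (String × Nat × Nat) → PySem.Set String → Bool
  | [], _ => true
  | (city, s, len) :: rest, visited =>
    if PySem.Set.contains visited city && (s != 0) && (s != n - 1) then false
    else if (len == 1) && decide (0 < s) && decide (s < n - 1) then false
    else pvCheckRuns n rest (PySem.Set.add visited city)

def is_valid_city_sequence_alt (city_list : List String) : Bool :=
  if city_list.length < 3 then false
  else pvCheckRuns city_list.length (pvBuildRuns city_list) PySem.Set.empty

-- ===== PRECONDITION & SPEC =====
def Spec_is_valid_city_sequence (city_list : List String) (out : Bool) : Prop := out = is_valid_city_sequence_alt city_list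
instance (city_list : List String) (out : Bool) : Decidable (Spec_is_valid_city_sequence city_list out) := by unfold Spec_is_valid_city_sequence; infer_instance

-- ===== CLAIM (what is proved, stated in full; the proofs are below) =====
def Claim_equal_is_valid_city_sequence : Prop := ∀ (city_list : List String), Dom_is_valid_city_sequence city_list → Spec_is_valid_city_sequence city_list (is_valid_city_sequence city_list)

-- ===== LEMMAS AND PROOFS =====

-- canonical runs table of xs starting at index s (proof-side bridge between the two ports)
def runsFrom (xs : List String) (s : Nat) : List (String × Nat × Nat) :=
  if h : s < xs.length then
    (xs[s]!, s, pvCountA xs xs[s]! s) :: runsFrom xs (s + pvCountA xs xs[s]! s)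
  else []
termination_by xs.length - s
decreasing_by
  have := pvCountA_pos xs s h
  omega

-- the count is 0 where the run is closed
theorem pvCountA_stop (xs : List String) (c : String) (j : Nat)
    (h : j = xs.length ∨ xs[j]! ≠ c) : pvCountA xs c j = 0 := by
  rw [pvCountA]
  split_ifs with h1 h2
  · rcases h with he | hne
    · omega
    · exact absurd h2 hne
  · rfl
  · rfl

theorem pvCountA_eq_aux (xs : List String) :
    ∀ (m s k : Nat), k - s ≤ m → s ≤ k → k < xs.length →
      (∀ j, s ≤ j → j ≤ k → xs[j]! = xs[s]!) →
      (k + 1 = xs.length ∨ xs[k + 1]! ≠ xs[s]!) →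
      pvCountA xs xs[s]! s = k + 1 - s := by
  intro m
  induction m with
  | zero =>
    intro s k hm hsk hk hall hbr
    have hs : s = k := by omega
    subst hs
    have hlt : s < xs.length := hk
    rw [pvCountA, dif_pos hlt, if_pos rfl, pvCountA_stop xs _ (s + 1) hbr]
    omega
  | succ m ih =>
    intro s k hm hsk hk hall hbr
    have hlt : s < xs.length := by omega
    rw [pvCountA, dif_pos hlt, if_pos rfl]
    by_cases heq : s = k
    · subst heq
      rw [pvCountA_stop xs _ (s + 1) hbr]
      omega
    · have key : xs[s + 1]! = xs[s]! := hall (s + 1) (by omega) (by omega)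
      rw [show pvCountA xs xs[s]! (s + 1) = pvCountA xs xs[s + 1]! (s + 1) by rw [key]]
      rw [ih (s + 1) k (by omega) (by omega) hk
        (fun j h1 h2 => by rw [key]; exact hall j (by omega) h2)
        (hbr.imp id (fun h => by rw [key]; exact h))]
      omega

-- characterisation of the inner count: a run [s, k] closed at k has count k + 1 - s
theorem pvCountA_eq (xs : List String) (s k : Nat) (hsk : s ≤ k) (hk : k < xs.length)
    (hall : ∀ j, s ≤ j → j ≤ k → xs[j]! = xs[s]!)
    (hbr : k + 1 = xs.length ∨ xs[k + 1]! ≠ xs[s]!) :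
    pvCountA xs xs[s]! s = k + 1 - s :=
  pvCountA_eq_aux xs (k - s) s k le_rfl hsk hk hall hbr

theorem loopA_eq_check_aux (xs : List String) :
    ∀ (m i : Nat) (visited : PySem.Set String), xs.length - i ≤ m →
      pvLoopA xs i visited = pvCheckRuns xs.length (runsFrom xs i) visited := by
  intro m
  induction m with
  | zero =>
    intro i visited hm
    rw [pvLoopA, runsFrom, dif_neg (by omega), dif_neg (by omega)]
    rfl
  | succ m ih =>
    intro i visited hm
    by_cases h : i < xs.length
    · rw [pvLoopA, runsFrom, dif_pos h, dif_pos h]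
      simp only [pvCheckRuns]
      have hpos := pvCountA_pos xs i h
      have hcond : ((pvCountA xs xs[i]! i == 1) && decide (0 < i + pvCountA xs xs[i]! i - 1)
            && decide (i + pvCountA xs xs[i]! i - 1 < xs.length - 1)) =
          ((pvCountA xs xs[i]! i == 1) && decide (0 < i) && decide (i < xs.length - 1)) := by
        by_cases h2 : pvCountA xs xs[i]! i = 1
        · rw [h2]
          simp
        · have h2' : (pvCountA xs xs[i]! i == 1) = false := by
            rw [beq_eq_false_iff_ne]
            exact h2
          rw [h2']
          simp
      simp only [hcond]
      by_cases h1 : (PySem.Set.contains visited xs[i]! && (i != 0) && (i != xs.length - 1)) = true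
      · simp only [h1, if_true]
      · rw [Bool.not_eq_true] at h1
        simp only [h1, Bool.false_eq_true, if_false]
        split
        · rfl
        · exact ih _ _ (by omega)
    · rw [pvLoopA, runsFrom, dif_neg h, dif_neg h]
      rfl

-- A's loop equals B's validation pass over the canonical runs table
theorem loopA_eq_check (xs : List String) (i : Nat) (visited : PySem.Set String) :
    pvLoopA xs i visited = pvCheckRuns xs.length (runsFrom xs i) visited :=
  loopA_eq_check_aux xs (xs.length - i) i visited le_rfl

-- invariant of B's grouping fold: from index k with current-run start s (all of xs[s..k]
-- equal so far), the fold appends exactly the canonical runs table from s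
theorem build_inv (xs : List String) :
    ∀ (m k s : Nat) (acc : List (String × Nat × Nat)),
      xs.length - k ≤ m → s ≤ k → k ≤ xs.length → (k = xs.length → s = xs.length) →
      (∀ j, s ≤ j → j ≤ k → j < xs.length → xs[j]! = xs[s]!) →
      (((xs.drop k).zipIdx k).foldl
        (fun (acc : List (String × Nat × Nat) × Nat) (p : String × Nat) =>
          if p.2 + 1 == xs.length || xs[p.2 + 1]! != p.1 then
            (acc.1 ++ [(p.1, acc.2, p.2 + 1 - acc.2)], p.2 + 1)
          else acc)
        (acc, s)).1 = acc ++ runsFrom xs s := by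
  intro m
  induction m with
  | zero =>
    intro k s acc hm hsk hkn hend _
    have hk : k = xs.length := by omega
    rw [hk, List.drop_length]
    rw [runsFrom, dif_neg (by omega)]
    simp [hend hk]
  | succ m ih =>
    intro k s acc hm hsk hkn hend hall
    by_cases hk : k < xs.length
    · rw [List.drop_eq_getElem_cons hk, List.zipIdx_cons, List.foldl_cons]
      have hek : xs[k]! = xs[s]! := hall k hsk le_rfl hk
      have hgk : xs[k] = xs[s]! := ((getElem!_pos xs k hk).symm).trans hek
      by_cases hbr : k + 1 = xs.length ∨ xs[k + 1]! ≠ xs[k]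
      · have hc : (k + 1 == xs.length || xs[k + 1]! != xs[k]) = true := by
          rw [Bool.or_eq_true, bne_iff_ne, beq_iff_eq]
          exact hbr
        simp only [hc, if_true]
        have hcnt : pvCountA xs xs[s]! s = k + 1 - s := by
          apply pvCountA_eq xs s k hsk hk
          · exact fun j h1 h2 => hall j h1 (by omega) (by omega)
          · rcases hbr with h | h
            · exact Or.inl h
            · right
              rw [← hgk]
              exact h
        have step := ih (k + 1) (k + 1) (acc ++ [(xs[k], s, k + 1 - s)]) (by omega) le_rfl
          (by omega) (fun he => he) (fun j h1 h2 h3 => by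
            have : j = k + 1 := by omega
            rw [this])
        rw [step]
        have hsl : s < xs.length := by omega
        have hsc : s + (k + 1 - s) = k + 1 := by omega
        conv_rhs => rw [runsFrom, dif_pos hsl, hcnt, hsc]
        rw [hgk]
        simp
      · push_neg at hbr
        have hc : (k + 1 == xs.length || xs[k + 1]! != xs[k]) = false := by
          rw [Bool.or_eq_false_iff]
          exact ⟨beq_eq_false_iff_ne.mpr hbr.1, bne_eq_false_iff_eq.mpr hbr.2⟩
        simp only [hc, Bool.false_eq_true, if_false]
        exact ih (k + 1) s acc (by omega) (by omega) (by omega)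
          (fun he => absurd he hbr.1)
          (fun j h1 h2 h3 => by
            rcases Nat.lt_or_ge j (k + 1) with hj | hj
            · exact hall j h1 (by omega) h3
            · have : j = k + 1 := by omega
              subst this
              rw [hbr.2, hgk])
    · have hke : k = xs.length := by omega
      rw [hke, List.drop_length]
      rw [runsFrom, dif_neg (by omega)]
      simp [hend hke]

-- B's grouping fold builds the canonical runs table
theorem buildRuns_eq_runsFrom (xs : List String) : pvBuildRuns xs = runsFrom xs 0 := by
  unfold pvBuildRuns
  have := build_inv xs xs.length 0 0 [] (by omega) (by omega) (by omega)
    (fun he => he) (fun j h1 h2 h3 => by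
      have hj0 : j = 0 := by omega
      rw [hj0])
  simpa using this

-- ===== VERDICT (by name: the statement is the Claim_ definition above) =====
theorem is_valid_city_sequence_spec : Claim_equal_is_valid_city_sequence := by
  intro xs _
  unfold Spec_is_valid_city_sequence is_valid_city_sequence is_valid_city_sequence_alt
  by_cases h : xs.length < 3
  · simp [h]
  · simp [h, loopA_eq_check, buildRuns_eq_runsFrom]
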